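-- pv_equiv track=rewrite | github.com/bhargavsundararajan/npm-package-analyzer | dependency-tree/HW2_43_src.py | red_str
-- ===== SOURCE A (Python) =====
-- def red_str(str):
--     flag = 0
--     s_lis = []
--     for c in str:
--         try:
--             temp = int(c)
--         except:
--             if flag == 1:
--                 flag = -1
--             continue
--         if flag == 0 or flag == 1:
--             s_lis.append(c)
--             flag = 1
--         elif flag == -1:
--             break
--     if len(s_lis) == 0:
--         return '1'
--     return ''.join(s_lis)
-- ===== SOURCE B (Python) =====
-- def red_str(str):
--     def isd(c):
--         try:
--             int(c)
--             return True
--         except ValueError: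
--             return False
--     n = len(str)
--     i = 0
--     while i < n and not isd(str[i]):
--         i += 1
--     j = i
--     while j < n and isd(str[j]):
--         j += 1
--     return str[i:j] if j > i else '1'
-- ===== Notes on version B (the rewrite author's own statement) =====
-- stated objective: simpler
-- what changed: Replaced the mutable-flag state machine (flag 0/1/-1 with break/continue and an accumulator list) by two plain forward scans: skip the non-digit prefix, then scan to the end of the first digit run, returning that slice or the fallback string.
import Mathlib
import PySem

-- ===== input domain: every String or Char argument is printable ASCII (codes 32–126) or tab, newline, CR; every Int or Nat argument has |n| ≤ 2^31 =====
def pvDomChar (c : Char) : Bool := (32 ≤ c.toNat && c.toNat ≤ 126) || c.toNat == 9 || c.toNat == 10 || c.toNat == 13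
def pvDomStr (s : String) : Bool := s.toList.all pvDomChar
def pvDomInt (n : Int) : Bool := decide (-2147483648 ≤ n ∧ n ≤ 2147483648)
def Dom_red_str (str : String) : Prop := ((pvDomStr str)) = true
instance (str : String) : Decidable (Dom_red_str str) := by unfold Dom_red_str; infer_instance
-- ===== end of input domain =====

-- B replaces A's mutable-flag state machine by two plain forward scans (skip the non-digit
-- prefix, then scan to the end of the first digit run); objective: simpler.

-- shared helper: Python's `try: int(c) / except: …` success test on a single character
-- (both A's loop body and B's isd perform exactly this test); exact via PySem.Int.ofChars?
def pyIsDigit (c : Char) : Bool := (PySem.Int.ofChars? [c]).isSome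

-- ===== PORT A =====
-- A's loop: flag 0 = before the run, 1 = inside the run, -1 = after the run; acc is reversed s_lis
def pvLoopA : List Char → Int → List Char → List Char
  | [], _, acc => acc.reverse
  | c :: cs, flag, acc =>
    if pyIsDigit c then
      if flag = 0 ∨ flag = 1 then pvLoopA cs 1 (c :: acc)
      else acc.reverse                    -- flag = -1: break
    else
      if flag = 1 then pvLoopA cs (-1) acc else pvLoopA cs flag acc

def red_str (str : String) : String :=
  let s_lis := pvLoopA str.toList 0 []
  if s_lis.length = 0 then "1" else String.ofList s_lis

-- ===== PORT B =====
-- first while loop: advance i past the leading non-digits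
def pvScanSkip (cs : List Char) (i : Nat) : Nat :=
  if h : i < cs.length then
    if pyIsDigit cs[i] then i else pvScanSkip cs (i + 1)
  else i
termination_by cs.length - i

-- second while loop: advance j to the end of the digit run
def pvScanRun (cs : List Char) (j : Nat) : Nat :=
  if h : j < cs.length then
    if pyIsDigit cs[j] then pvScanRun cs (j + 1) else j
  else j
termination_by cs.length - j

def red_str_alt (str : String) : String :=
  let cs := str.toList
  let i := pvScanSkip cs 0
  let j := pvScanRun cs i
  if i < j then String.ofList (PySem.List.slice cs (some (i : Int)) (some (j : Int))) else "1"

-- ===== PRECONDITION & SPEC =====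
def Spec_red_str (str : String) (out : String) : Prop := out = red_str_alt str
instance (str : String) (out : String) : Decidable (Spec_red_str str out) := by unfold Spec_red_str; infer_instance

-- ===== CLAIM (what is proved, stated in full; the proofs are below) =====
def Claim_equal_red_str : Prop := ∀ (str : String), Dom_red_str str → Spec_red_str str (red_str str)

-- ===== LEMMAS AND PROOFS =====

-- A-side: once flag = -1 the loop only ever continues or breaks, returning acc
theorem pvLoopA_neg (cs : List Char) (acc : List Char) :
    pvLoopA cs (-1) acc = acc.reverse := by
  induction cs with
  | nil => rfl
  | cons c cs ih => simp [pvLoopA, ih]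

-- A-side: in the run (flag = 1), the loop appends exactly the leading digit run
theorem pvLoopA_one (cs : List Char) (acc : List Char) :
    pvLoopA cs 1 acc = acc.reverse ++ cs.takeWhile pyIsDigit := by
  induction cs generalizing acc with
  | nil => simp [pvLoopA]
  | cons c cs ih =>
    by_cases h : pyIsDigit c
    · simp [pvLoopA, h, ih]
    · simp [pvLoopA, h, pvLoopA_neg]

-- A-side: the whole loop from flag 0 is the digit run after the non-digit prefix
theorem pvLoopA_zero (cs : List Char) :
    pvLoopA cs 0 [] = (cs.dropWhile (fun c => !pyIsDigit c)).takeWhile pyIsDigit := by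
  induction cs with
  | nil => rfl
  | cons c cs ih =>
    by_cases h : pyIsDigit c
    · simp [pvLoopA, h, pvLoopA_one]
    · simp [pvLoopA, h, ih]

-- takeWhile of a suffix, one step
theorem takeWhile_drop_cons (p : Char → Bool) (cs : List Char) (i : Nat) (h : i < cs.length) :
    (cs.drop i).takeWhile p = if p cs[i] then cs[i] :: (cs.drop (i + 1)).takeWhile p else [] := by
  rw [List.drop_eq_getElem_cons h, List.takeWhile_cons]

-- B-side: the first scan stops after the non-digit prefix of the suffix at i
theorem pvScanSkip_spec (cs : List Char) (i : Nat) :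
    pvScanSkip cs i = i + ((cs.drop i).takeWhile (fun c => !pyIsDigit c)).length := by
  by_cases h : i < cs.length
  · by_cases hd : pyIsDigit cs[i]
    · rw [pvScanSkip]; simp [h, hd, takeWhile_drop_cons _ cs i h]
    · rw [pvScanSkip]
      simp only [h, dif_pos, hd, Bool.false_eq_true, if_neg, not_false_iff]
      rw [pvScanSkip_spec cs (i + 1), takeWhile_drop_cons _ cs i h]
      simp [hd]
      omega
  · rw [pvScanSkip]
    simp [h, List.drop_eq_nil_of_le (le_of_not_gt h)]
termination_by cs.length - i

-- B-side: the second scan stops after the digit run of the suffix at j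
theorem pvScanRun_spec (cs : List Char) (j : Nat) :
    pvScanRun cs j = j + ((cs.drop j).takeWhile pyIsDigit).length := by
  by_cases h : j < cs.length
  · by_cases hd : pyIsDigit cs[j]
    · rw [pvScanRun]
      simp only [h, dif_pos, hd, if_pos]
      rw [pvScanRun_spec cs (j + 1), takeWhile_drop_cons _ cs j h]
      simp [hd]
      omega
    · rw [pvScanRun]; simp [h, hd, takeWhile_drop_cons _ cs j h]
  · rw [pvScanRun]
    simp [h, List.drop_eq_nil_of_le (le_of_not_gt h)]
termination_by cs.length - j

-- dropping the length of the takeWhile-prefix is dropWhile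
theorem drop_len_takeWhile (p : Char → Bool) (cs : List Char) :
    cs.drop ((cs.takeWhile p).length) = cs.dropWhile p := by
  induction cs with
  | nil => rfl
  | cons c cs ih =>
    by_cases h : p c
    · simp [h, ih]
    · simp [h]

-- taking the length of the takeWhile-prefix is takeWhile
theorem take_len_takeWhile (p : Char → Bool) (cs : List Char) :
    cs.take ((cs.takeWhile p).length) = cs.takeWhile p := by
  induction cs with
  | nil => rfl
  | cons c cs ih =>
    by_cases h : p c
    · simp [h, ih]
    · simp [h]

-- list-level equality of the two programs
theorem red_str_main (cs : List Char) :
    (if (pvLoopA cs 0 []).length = 0 then "1" else String.ofList (pvLoopA cs 0 [])) =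
    (if pvScanSkip cs 0 < pvScanRun cs (pvScanSkip cs 0) then
        String.ofList (PySem.List.slice cs (some ((pvScanSkip cs 0 : Nat) : Int))
          (some ((pvScanRun cs (pvScanSkip cs 0) : Nat) : Int)))
      else "1") := by
  set i := pvScanSkip cs 0 with hi
  set j := pvScanRun cs i with hj
  set run := (cs.dropWhile (fun c => !pyIsDigit c)).takeWhile pyIsDigit with hrun
  have hI : i = (cs.takeWhile (fun c => !pyIsDigit c)).length := by
    rw [hi, pvScanSkip_spec]; simp
  have hdropI : cs.drop i = cs.dropWhile (fun c => !pyIsDigit c) := by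
    rw [hI, drop_len_takeWhile]
  have hJ : j = i + run.length := by
    rw [hj, pvScanRun_spec, hdropI, hrun]
  have hslice : PySem.List.slice cs (some (i : Int)) (some (j : Int)) = run := by
    rw [PySem.List.slice_toNat cs (by positivity) (by positivity)]
    simp only [Int.toNat_natCast]
    rw [hdropI, hJ, Nat.add_sub_cancel_left, hrun, take_len_takeWhile]
  rw [pvLoopA_zero, ← hrun, hslice]
  by_cases hnil : run = []
  · have : ¬ i < j := by rw [hJ, hnil]; simp
    simp [hnil, this]
  · have h0 : 0 < run.length := List.length_pos_of_ne_nil hnil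
    have : i < j := by omega
    simp [this, List.length_eq_zero_iff, hnil]

-- ===== VERDICT (by name: the statement is the Claim_ definition above) =====
theorem red_str_spec : Claim_equal_red_str := by
  intro str _
  unfold Spec_red_str red_str red_str_alt
  exact red_str_main str.toList
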